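-- pv_equiv track=rewrite | github.com/Andrew-Finn/Daily-Coding-Problems | 2019/11 Nov/07th.py | string_palindrome
-- ===== SOURCE A (Python) =====
-- def string_palindrome(s):
--     if len(s) == 0:
--         return []
--     i, lrg = 0, 0
--     while i < len(s):
--         if s[:i + 1] == s[i::-1]:
--             lrg = i + 1
--         i += 1
--     return [s[:lrg]] + string_palindrome(s[lrg:])
-- ===== SOURCE B (Python) =====
-- def string_palindrome(s):
--     chunks = []
--     while s:
--         k = len(s)
--         while s[:k] != s[:k][::-1]:
--             k -= 1
--         chunks.append(s[:k])
--         s = s[k:]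
--     return chunks
-- ===== Notes on version B (the rewrite author's own statement) =====
-- stated objective: alternative
-- what changed: A recursively chops off the longest palindromic prefix found by an upward scan over all prefixes remembering the last palindromic one; B is an iterative loop that for each chunk searches downward from the full remaining length and stops at the first palindromic prefix, appending chunks to an accumulator.
import Mathlib
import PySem

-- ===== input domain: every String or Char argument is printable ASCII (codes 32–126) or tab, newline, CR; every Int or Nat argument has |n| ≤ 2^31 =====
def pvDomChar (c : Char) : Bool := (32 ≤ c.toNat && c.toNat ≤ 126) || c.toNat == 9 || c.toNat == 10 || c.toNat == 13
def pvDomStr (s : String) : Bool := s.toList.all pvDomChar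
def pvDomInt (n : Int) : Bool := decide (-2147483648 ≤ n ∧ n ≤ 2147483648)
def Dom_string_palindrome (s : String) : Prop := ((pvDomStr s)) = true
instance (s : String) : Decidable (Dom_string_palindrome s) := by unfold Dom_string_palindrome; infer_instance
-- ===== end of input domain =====

-- B replaces A's recursive upward scan that remembers the LAST palindromic prefix by an
-- iterative loop that searches DOWNWARD from the full length for the FIRST palindromic
-- prefix (alternative decomposition, same cost; both greedily cut the longest palindromic prefix).

-- ===== PORT A =====
-- The two lemmas kept above the port are exactly what its `decreasing_by` clause cites.

-- s[i::-1] for 0 ≤ i < len(s) is the reversed (i+1)-prefix (exact unfolding of PySem.List.slice?)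
theorem sliceRevPrefixAux {α : Type} (l : List α) : ∀ (m : Nat), m < l.length →
    List.filterMap (fun k : Nat => l[((m : Int) - (k : Int)).toNat]?) (List.range (m + 1)) =
      (l.take (m + 1)).reverse := by
  intro m
  induction m with
  | zero =>
    intro h
    simp [List.range_succ_eq_map, List.take_add_one, List.getElem?_eq_getElem h]
  | succ m ih =>
    intro h
    rw [List.range_succ_eq_map, List.filterMap_cons, List.filterMap_map]
    have hfe : (fun k : Nat => l[(((m + 1 : Nat) : Int) - (k : Int)).toNat]?) ∘ Nat.succ
        = fun k : Nat => l[((m : Int) - (k : Int)).toNat]? := by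
      funext k
      simp only [Function.comp]
      congr 1
      omega
    rw [hfe, ih (by omega)]
    have hg : l[(((m + 1 : Nat) : Int) - ((0 : Nat) : Int)).toNat]? = some l[m + 1] := by
      rw [List.getElem?_eq_getElem (by omega : (((m + 1 : Nat) : Int) - ((0 : Nat) : Int)).toNat < l.length)]
      congr 1
    rw [hg]
    show l[m + 1] :: (List.take (m + 1) l).reverse = (List.take (m + 1 + 1) l).reverse
    have ht : List.take (m + 1 + 1) l = List.take (m + 1) l ++ [l[m + 1]] := by
      rw [List.take_add_one, List.getElem?_eq_getElem h, Option.toList_some]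
    rw [ht, List.reverse_append]
    simp

theorem sliceRevPrefix {α : Type} (l : List α) (m : Nat) (h : m < l.length) :
    PySem.List.slice? l (some (m : Int)) none (-1) = some ((l.take (m + 1)).reverse) := by
  unfold PySem.List.slice? PySem.List.sliceIndices
  norm_num
  have hmin : min (↑m) ((l.length : Int) - 1) = (m : Int) := by omega
  rw [if_neg (by omega : ¬ ((m : Int) < 0)), hmin, if_pos (by omega : (-1 : Int) < (m : Int)),
    (by omega : ((m : Int) + 1).toNat = m + 1)]
  have hfe : (fun x : Nat => l[((m : Int) + -(x : Int)).toNat]?)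
      = fun k : Nat => l[((m : Int) - (k : Int)).toNat]? := by
    funext k; congr 1
  rw [hfe]
  exact sliceRevPrefixAux l m h

-- the body of A's while loop: `if s[:i+1] == s[i::-1]: lrg = i+1`
def string_palindrome_step (l : List Char) (lrg i : Int) : Int :=
  if PySem.List.slice l none (some (i + 1)) = (PySem.List.slice? l (some i) none (-1)).getD []
  then i + 1 else lrg

-- A's while loop: i runs 0,1,…,len(s)-1 carrying lrg (initially 0)
def string_palindrome_lrg (l : List Char) : Int :=
  (PySem.List.pyRange 0 (l.length : Int) 1).foldl (string_palindrome_step l) 0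

theorem string_palindrome_step_ge (l : List Char) (is : List Int) :
    ∀ (x : Int), 1 ≤ x → (∀ i ∈ is, 0 ≤ i) → 1 ≤ is.foldl (string_palindrome_step l) x := by
  induction is with
  | nil => intro x hx _; exact hx
  | cons i is ih =>
    intro x hx hmem
    simp only [List.foldl_cons]
    have hi : 0 ≤ i := hmem i List.mem_cons_self
    refine ih _ ?_ (fun j hj => hmem j (List.mem_cons_of_mem i hj))
    unfold string_palindrome_step
    split <;> omega

theorem string_palindrome_lrg_pos (l : List Char) (h : l ≠ []) : 1 ≤ string_palindrome_lrg l := by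
  have hlen : 0 < l.length := List.length_pos_iff.mpr h
  unfold string_palindrome_lrg
  rw [PySem.List.pyRange_one_cons (by exact_mod_cast hlen), List.foldl_cons]
  have h0 : string_palindrome_step l 0 0 = 1 := by
    unfold string_palindrome_step
    have hcond : PySem.List.slice l none (some ((0 : Int) + 1))
        = (PySem.List.slice? l (some (0 : Int)) none (-1)).getD [] := by
      rw [(by norm_num : (some ((0 : Int) + 1)) = some ((1 : Nat) : Int)),
        PySem.List.slice_to_natCast,
        (by norm_num : (some (0 : Int)) = some ((0 : Nat) : Int)), sliceRevPrefix l 0 hlen,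
        Option.getD_some]
      cases l <;> simp
    rw [if_pos hcond]
    norm_num
  rw [h0]
  refine string_palindrome_step_ge l _ 1 le_rfl (fun i hi => ?_)
  have := (PySem.List.mem_pyRange_one.mp hi).1
  omega

def string_palindromeChars (l : List Char) : List String :=
  if hl : l = [] then []
  else
    let lrg := string_palindrome_lrg l
    String.ofList (PySem.List.slice l none (some lrg)) ::
      string_palindromeChars (PySem.List.slice l (some lrg) none)
termination_by l.length
decreasing_by
  have h1 := string_palindrome_lrg_pos l hl
  rw [PySem.List.slice_from l (by omega)]
  have : l.length ≠ 0 := fun hn => hl (List.eq_nil_of_length_eq_zero hn)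
  simp only [List.length_drop]
  omega

def string_palindrome (s : String) : List String := string_palindromeChars s.toList

-- ===== PORT B =====
-- termination lemmas for B's port (cited in its `decreasing_by`)
theorem take_one_palin (l : List Char) : l.take 1 = (l.take 1).reverse := by
  cases l <;> simp

-- B's inner while loop: k counts down from len(s) until s[:k] == s[:k][::-1]
def string_palindrome_findK (l : List Char) : Nat → Nat
  | 0 => 0
  | Nat.succ k =>
      let p := PySem.List.slice l none (some ((k : Int) + 1))
      if p ≠ (PySem.List.slice? p none none (-1)).getD [] then string_palindrome_findK l k
      else k + 1

theorem findK_succ (l : List Char) (k : Nat) :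
    string_palindrome_findK l (k + 1) =
      if l.take (k + 1) ≠ (l.take (k + 1)).reverse then string_palindrome_findK l k else k + 1 := by
  show (let p := PySem.List.slice l none (some ((k : Int) + 1));
    if p ≠ (PySem.List.slice? p none none (-1)).getD [] then string_palindrome_findK l k else k + 1) = _
  have hc : ((k : Int) + 1) = ((k + 1 : Nat) : Int) := by push_cast; ring
  simp only [hc, PySem.List.slice_to_natCast, PySem.List.slice?_none_none_neg_one, Option.getD_some]

theorem string_palindrome_findK_pos (l : List Char) (k : Nat) :
    1 ≤ string_palindrome_findK l (k + 1) := by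
  induction k with
  | zero => rw [findK_succ]; simp [← take_one_palin l]
  | succ k ih => rw [findK_succ]; split <;> omega

-- B's outer while loop, chunk by chunk
def string_palindromeAltChars (l : List Char) : List String :=
  if hl : l = [] then []
  else
    let k := string_palindrome_findK l l.length
    String.ofList (PySem.List.slice l none (some (k : Int))) ::
      string_palindromeAltChars (PySem.List.slice l (some (k : Int)) none)
termination_by l.length
decreasing_by
  have hn : l.length ≠ 0 := fun hn => hl (List.eq_nil_of_length_eq_zero hn)
  obtain ⟨m, hm⟩ : ∃ m, l.length = m + 1 := ⟨l.length - 1, by omega⟩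
  have h1 := string_palindrome_findK_pos l m
  rw [PySem.List.slice_from l (by positivity)]
  simp only [List.length_drop]
  rw [hm] at *
  omega

def string_palindrome_alt (s : String) : List String := string_palindromeAltChars s.toList

-- ===== PRECONDITION & SPEC =====
def Spec_string_palindrome (s : String) (out : List String) : Prop := out = string_palindrome_alt s
instance (s : String) (out : List String) : Decidable (Spec_string_palindrome s out) := by unfold Spec_string_palindrome; infer_instance

-- ===== CLAIM (what is proved, stated in full; the proofs are below) =====
def Claim_equal_string_palindrome : Prop := ∀ (s : String), Dom_string_palindrome s → Spec_string_palindrome s (string_palindrome s)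

-- ===== LEMMAS AND PROOFS =====

-- A's loop test at index m (m < len) is "the (m+1)-prefix is a palindrome"
theorem condA_iff (l : List Char) (m : Nat) (h : m < l.length) :
    (PySem.List.slice l none (some ((m : Int) + 1)) =
      (PySem.List.slice? l (some (m : Int)) none (-1)).getD [])
      ↔ l.take (m + 1) = (l.take (m + 1)).reverse := by
  have hc : ((m : Int) + 1) = ((m + 1 : Nat) : Int) := by push_cast; ring
  rw [hc, PySem.List.slice_to_natCast, sliceRevPrefix l m h, Option.getD_some]

-- A's upward last-match fold equals B's downward first-match search, step by step
theorem fold_eq_findK (l : List Char) (m : Nat) (hm : m ≤ l.length) :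
    (PySem.List.pyRange 0 (m : Int) 1).foldl (string_palindrome_step l) 0 =
      (string_palindrome_findK l m : Int) := by
  induction m with
  | zero => simp [PySem.List.pyRange_one_eq_nil le_rfl, string_palindrome_findK]
  | succ m ih =>
    have hc : ((m + 1 : Nat) : Int) = (m : Int) + 1 := by push_cast; ring
    rw [hc, PySem.List.pyRange_one_succ_right (by positivity), List.foldl_append,
      ih (by omega), findK_succ]
    show string_palindrome_step l _ _ = _
    unfold string_palindrome_step
    rw [if_congr (condA_iff l m (by omega)) rfl rfl]
    by_cases hp : l.take (m + 1) = (l.take (m + 1)).reverse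
    · rw [if_pos hp, if_neg (not_not_intro hp)]; push_cast; ring
    · rw [if_neg hp, if_pos hp]

theorem lrg_eq_findK (l : List Char) :
    string_palindrome_lrg l = (string_palindrome_findK l l.length : Int) :=
  fold_eq_findK l l.length le_rfl

theorem chars_eq_aux : ∀ (n : Nat) (l : List Char), l.length ≤ n →
    string_palindromeChars l = string_palindromeAltChars l := by
  intro n
  induction n with
  | zero =>
    intro l hl
    have : l = [] := List.eq_nil_of_length_eq_zero (by omega)
    subst this
    rw [string_palindromeChars, string_palindromeAltChars]
    simp
  | succ n ih =>
    intro l hl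
    rw [string_palindromeChars, string_palindromeAltChars]
    by_cases hE : l = []
    · simp [hE]
    · simp only [dif_neg hE, lrg_eq_findK]
      congr 1
      refine ih _ ?_
      rw [PySem.List.slice_from l (by positivity)]
      have hn : l.length ≠ 0 := fun h0 => hE (List.eq_nil_of_length_eq_zero h0)
      obtain ⟨m, hm⟩ : ∃ m, l.length = m + 1 := ⟨l.length - 1, by omega⟩
      have h1 := string_palindrome_findK_pos l m
      have hl' : m + 1 ≤ n + 1 := hm ▸ hl
      simp only [List.length_drop, Int.toNat_natCast]
      rw [hm]
      omega

theorem chars_eq (l : List Char) : string_palindromeChars l = string_palindromeAltChars l :=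
  chars_eq_aux l.length l le_rfl

-- ===== VERDICT (by name: the statement is the Claim_ definition above) =====
theorem string_palindrome_spec : Claim_equal_string_palindrome := by
  intro s _
  unfold Spec_string_palindrome string_palindrome string_palindrome_alt
  exact chars_eq s.toList
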